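-- pv_equiv track=rewrite | github.com/NoCoderRandom/sunsetscan | core/host_capability.py | downgrade_nmap_args
-- ===== SOURCE A (Python) =====
-- from typing import Dict, List, Optional, Tuple
--
-- def downgrade_nmap_args(args: str) -> str:
--     """Strip the most network-hostile flags from an nmap argument string.
--
--     Removes:
--       -O / --osscan-guess  : OS fingerprinting (sends crafted probes that
--                              can wedge consumer routers)
--       -A                   : aggressive (-O + -sV + -sC + traceroute)
--                              — replaced with just -sV -sC
--       -T4 / -T5            : aggressive timing — downgraded to -T3
--
--     Idempotent: re-applying produces the same result.
--     """
--     if not args: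
--         return args
--     out: List[str] = []
--     skip_next = False
--     for tok in args.split():
--         if skip_next:
--             skip_next = False
--             continue
--         if tok in ("-O", "--osscan-guess", "--osscan-limit"):
--             continue
--         if tok == "-A":
--             # Replace -A (which implies -O) with -sV -sC
--             out.extend(["-sV", "-sC"])
--             continue
--         if tok in ("-T4", "-T5"):
--             out.append("-T3")
--             continue
--         out.append(tok)
--     # Deduplicate the version/script flags that -A may have already added
--     seen = set()
--     deduped: List[str] = []
--     for tok in out:
--         if tok in ("-sV", "-sC") and tok in seen:
--             continue
--         seen.add(tok)
--         deduped.append(tok)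
--     return " ".join(deduped)
-- ===== SOURCE B (Python) =====
-- def downgrade_nmap_args(args: str) -> str:
--     """Single fused pass: strip/downgrade hostile flags and dedup -sV/-sC as we go."""
--     if not args:
--         return args
--     seen = set()
--     out = []
--
--     def emit(flag):
--         # append a -sV/-sC flag only on its first occurrence
--         if flag not in seen:
--             seen.add(flag)
--             out.append(flag)
--
--     for tok in args.split():
--         if tok in ("-O", "--osscan-guess", "--osscan-limit"):
--             continue
--         if tok == "-A":
--             emit("-sV")
--             emit("-sC")
--         elif tok in ("-T4", "-T5"):
--             out.append("-T3")
--         elif tok in ("-sV", "-sC"):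
--             emit(tok)
--         else:
--             out.append(tok)
--     return " ".join(out)
-- ===== Notes on version B (the rewrite author's own statement) =====
-- stated objective: simpler
-- what changed: A's two sequential passes (strip/downgrade into a list, then a dedup pass whose seen set records every token) are fused into one loop over the split tokens that appends directly and tracks only -sV/-sC in the seen set.
import Mathlib
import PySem

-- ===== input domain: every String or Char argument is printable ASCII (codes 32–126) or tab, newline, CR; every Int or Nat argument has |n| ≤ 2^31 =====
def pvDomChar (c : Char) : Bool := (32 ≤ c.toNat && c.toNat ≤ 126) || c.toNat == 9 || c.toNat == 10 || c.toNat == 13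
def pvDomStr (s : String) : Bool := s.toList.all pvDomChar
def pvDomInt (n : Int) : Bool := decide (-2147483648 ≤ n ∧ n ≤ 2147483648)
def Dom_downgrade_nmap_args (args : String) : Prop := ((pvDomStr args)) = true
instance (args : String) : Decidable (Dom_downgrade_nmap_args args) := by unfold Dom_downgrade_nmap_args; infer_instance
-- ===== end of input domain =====

-- B fuses A's two passes (strip/downgrade, then dedup -sV/-sC) into one loop with a seen set; objective: simpler.

-- ===== PORT A =====
-- first pass of A: strip/downgrade, with the (dead) skip_next flag kept faithfully
def pvAStep (st : List String × Bool) (tok : String) : List String × Bool :=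
  if st.2 then (st.1, false)
  else if tok == "-O" || tok == "--osscan-guess" || tok == "--osscan-limit" then st
  else if tok == "-A" then (st.1 ++ ["-sV", "-sC"], st.2)
  else if tok == "-T4" || tok == "-T5" then (st.1 ++ ["-T3"], st.2)
  else (st.1 ++ [tok], st.2)

-- second pass of A: dedup the -sV/-sC flags via the seen set
def pvADedupStep (st : PySem.Set String × List String) (tok : String) : PySem.Set String × List String :=
  if (tok == "-sV" || tok == "-sC") && st.1.contains tok then st
  else (st.1.add tok, st.2 ++ [tok])

def downgrade_nmap_args (args : String) : String :=
  if args == "" then args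
  else
    let out := ((PySem.Str.split₀ args).foldl pvAStep ([], false)).1
    let deduped := (out.foldl pvADedupStep (PySem.Set.empty, [])).2
    PySem.Str.join " " deduped

-- ===== PORT B =====
def pvBEmit (st : PySem.Set String × List String) (flag : String) : PySem.Set String × List String :=
  if st.1.contains flag then st else (st.1.add flag, st.2 ++ [flag])

def pvBStep (st : PySem.Set String × List String) (tok : String) : PySem.Set String × List String :=
  if tok == "-O" || tok == "--osscan-guess" || tok == "--osscan-limit" then st
  else if tok == "-A" then pvBEmit (pvBEmit st "-sV") "-sC"
  else if tok == "-T4" || tok == "-T5" then (st.1, st.2 ++ ["-T3"])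
  else if tok == "-sV" || tok == "-sC" then pvBEmit st tok
  else (st.1, st.2 ++ [tok])

def downgrade_nmap_args_alt (args : String) : String :=
  if args == "" then args
  else PySem.Str.join " " ((PySem.Str.split₀ args).foldl pvBStep (PySem.Set.empty, [])).2

-- ===== PRECONDITION & SPEC =====
def Spec_downgrade_nmap_args (args : String) (out : String) : Prop := out = downgrade_nmap_args_alt args
instance (args : String) (out : String) : Decidable (Spec_downgrade_nmap_args args out) := by unfold Spec_downgrade_nmap_args; infer_instance

-- ===== CLAIM (what is proved, stated in full; the proofs are below) =====
def Claim_equal_downgrade_nmap_args : Prop := ∀ (args : String), Dom_downgrade_nmap_args args → Spec_downgrade_nmap_args args (downgrade_nmap_args args)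

-- ===== LEMMAS AND PROOFS =====

-- tokens emitted by A's first pass for one input token
def pvSeg (tok : String) : List String :=
  if tok == "-O" || tok == "--osscan-guess" || tok == "--osscan-limit" then []
  else if tok == "-A" then ["-sV", "-sC"]
  else if tok == "-T4" || tok == "-T5" then ["-T3"]
  else [tok]

theorem pvAStep_eq (out : List String) (tok : String) :
    pvAStep (out, false) tok = (out ++ pvSeg tok, false) := by
  simp only [pvAStep, pvSeg]
  split_ifs <;> simp_all

theorem phase1_eq (toks : List String) (out : List String) :
    toks.foldl pvAStep (out, false) = (out ++ toks.flatMap pvSeg, false) := by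
  induction toks generalizing out with
  | nil => simp
  | cons t ts ih => simp [pvAStep_eq, ih]

def pvInv (SA SB : PySem.Set String) : Prop :=
  ∀ f : String, (f == "-sV" || f == "-sC") = true → SA.contains f = SB.contains f

theorem contains_add_of_ne (s : PySem.Set String) (x y : String) (h : y ≠ x) :
    (s.add x).contains y = s.contains y := by
  rw [Bool.eq_iff_iff]
  simp [PySem.Set.mem_add, h]

theorem flag_cases (f : String) (hf : (f == "-sV" || f == "-sC") = true) :
    f = "-sV" ∨ f = "-sC" := by simpa using hf

theorem emit_step (flag : String) (hf : (flag == "-sV" || flag == "-sC") = true)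
    (stA stB : PySem.Set String × List String) (he : stA.2 = stB.2)
    (hI : pvInv stA.1 stB.1) :
    (pvADedupStep stA flag).2 = (pvBEmit stB flag).2 ∧
      pvInv (pvADedupStep stA flag).1 (pvBEmit stB flag).1 := by
  unfold pvADedupStep pvBEmit
  rw [hf, Bool.true_and, hI flag hf]
  by_cases hc : stB.1.contains flag = true
  · simp only [hc, if_true]
    exact ⟨he, hI⟩
  · simp only [hc, if_false, Bool.false_eq_true]
    refine ⟨by simp [he], ?_⟩
    intro f hf'
    by_cases hfe : f = flag
    · subst hfe; simp [PySem.Set.mem_add]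
    · rw [contains_add_of_ne _ _ _ hfe, contains_add_of_ne _ _ _ hfe]
      exact hI f hf'

theorem tok_step (t : String) (SA SB : PySem.Set String) (acc : List String)
    (hI : pvInv SA SB) :
    ((pvSeg t).foldl pvADedupStep (SA, acc)).2 = (pvBStep (SB, acc) t).2 ∧
      pvInv ((pvSeg t).foldl pvADedupStep (SA, acc)).1 (pvBStep (SB, acc) t).1 := by
  by_cases h1 : (t == "-O" || t == "--osscan-guess" || t == "--osscan-limit") = true
  · simp only [pvSeg, pvBStep, h1, if_true, List.foldl_nil]
    exact ⟨by trivial, hI⟩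
  · by_cases h2 : (t == "-A") = true
    · simp only [pvSeg, pvBStep, h1, h2, if_false, if_true, Bool.false_eq_true, List.foldl_cons, List.foldl_nil]
      have s1 := emit_step "-sV" (by decide) (SA, acc) (SB, acc) rfl hI
      have s2 := emit_step "-sC" (by decide) _ _ s1.1 s1.2
      exact s2
    · by_cases h3 : (t == "-T4" || t == "-T5") = true
      · simp only [pvSeg, pvBStep, h1, h2, h3, if_true, if_false, Bool.false_eq_true, List.foldl_cons, List.foldl_nil]
        have hA : pvADedupStep (SA, acc) "-T3" = (SA.add "-T3", acc ++ ["-T3"]) := by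
          simp [pvADedupStep]
        rw [hA]
        refine ⟨by trivial, ?_⟩
        intro f hf
        have hne : f ≠ "-T3" := by
          rcases flag_cases f hf with h | h <;> subst h <;> decide
        rw [contains_add_of_ne _ _ _ hne]
        exact hI f hf
      · by_cases h4 : (t == "-sV" || t == "-sC") = true
        · simp only [pvSeg, pvBStep, h1, h2, h3, h4, if_true, if_false, Bool.false_eq_true, List.foldl_cons, List.foldl_nil]
          exact emit_step t h4 (SA, acc) (SB, acc) rfl hI
        · simp only [pvSeg, pvBStep, h1, h2, h3, h4, if_false, Bool.false_eq_true, List.foldl_cons, List.foldl_nil]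
          have hA : pvADedupStep (SA, acc) t = (SA.add t, acc ++ [t]) := by
            simp [pvADedupStep, h4]
          rw [hA]
          refine ⟨by trivial, ?_⟩
          intro f hf
          have hne : f ≠ t := by
            intro he; subst he; exact absurd hf h4
          rw [contains_add_of_ne _ _ _ hne]
          exact hI f hf

theorem fuse (toks : List String) (SA SB : PySem.Set String) (acc : List String)
    (hI : pvInv SA SB) :
    ((toks.flatMap pvSeg).foldl pvADedupStep (SA, acc)).2
      = (toks.foldl pvBStep (SB, acc)).2 := by
  induction toks generalizing SA SB acc with
  | nil => simp
  | cons t ts ih =>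
    rw [List.flatMap_cons, List.foldl_append, List.foldl_cons]
    obtain ⟨he, hi⟩ := tok_step t SA SB acc hI
    have h1 := ih ((pvSeg t).foldl pvADedupStep (SA, acc)).1 (pvBStep (SB, acc) t).1
      ((pvSeg t).foldl pvADedupStep (SA, acc)).2 hi
    rw [Prod.mk.eta] at h1
    rw [h1, he, Prod.mk.eta]

theorem downgrade_nmap_args_spec : Claim_equal_downgrade_nmap_args := by
  intro args _
  unfold Spec_downgrade_nmap_args downgrade_nmap_args downgrade_nmap_args_alt
  split_ifs with h
  · rfl
  · simp only [phase1_eq, List.nil_append]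
    exact congrArg _ (fuse _ _ _ _ (fun _ _ => rfl))
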